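-- pv_equiv track=rewrite | github.com/iajayyadav/SAICRT | 4_August_Batch/Python/Array/primePairsInArray.py | pairPrime
-- ===== SOURCE A (Python) =====
-- from math import sqrt
--
-- def isPrime(n):
--     if(n<=1):
--         return False
--     i=2
--     end=int(sqrt(n))
--     while(i<=end):
--         if(n%i==0):
--             return False
--         i=i+1
--     return True
--
-- def pairPrime(n,arr):
--     count=0
--     for i in range(n):
--         for j in range(i+1,n):
--             x=isPrime(arr[i])
--             y=isPrime(arr[j])
--             if(x==True and y==True):
--                 count=count+1
--     return count
-- ===== SOURCE B (Python) =====
-- def pairPrime(n, arr):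
--     # Count primes among the first n elements once, then use the closed form
--     # C(k, 2): every unordered pair of prime positions is counted exactly once.
--     k = 0
--     for i in range(n):
--         if _is_prime(arr[i]):
--             k += 1
--     return k * (k - 1) // 2
--
--
-- def _is_prime(m):
--     if m < 2:
--         return False
--     d = 2
--     while d * d <= m:
--         if m % d == 0:
--             return False
--         d += 1
--     return True
-- ===== Notes on version B (the rewrite author's own statement) =====
-- stated objective: faster
-- what changed: Replaces the nested O(n^2) pair loop (which re-tests primality of each element n-1 times) by a single pass counting the k prime elements once and returning the closed form k*(k-1)//2.
-- outside the precondition, e.g. on pairPrime(1, []): A returns 0, B raises IndexError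
import Mathlib
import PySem

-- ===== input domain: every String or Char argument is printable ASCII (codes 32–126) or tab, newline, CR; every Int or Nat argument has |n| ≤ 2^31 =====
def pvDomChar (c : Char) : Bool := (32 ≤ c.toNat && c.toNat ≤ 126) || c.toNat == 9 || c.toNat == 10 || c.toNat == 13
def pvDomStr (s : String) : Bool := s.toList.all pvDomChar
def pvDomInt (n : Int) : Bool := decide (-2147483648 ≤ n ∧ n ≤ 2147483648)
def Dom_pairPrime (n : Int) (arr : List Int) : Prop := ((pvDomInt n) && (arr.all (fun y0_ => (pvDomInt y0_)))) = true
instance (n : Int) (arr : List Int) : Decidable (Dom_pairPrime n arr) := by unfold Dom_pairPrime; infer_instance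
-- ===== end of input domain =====

-- B replaces A's nested pair loop (which re-tests primality of each element up to n-1 times)
-- by one pass counting the k prime elements and the closed form k*(k-1)//2.


-- ===== PORT A =====
-- while(i<=end): if n%i==0: return False; i=i+1
def isPrimeLoopA (n : Int) (endv : Nat) (i : Nat) : Bool :=
  if i ≤ endv then
    if PySem.Int.mod n i = 0 then false else isPrimeLoopA n endv (i + 1)
  else true
termination_by endv + 1 - i

-- end = int(sqrt(n)) ported as Nat.sqrt: CPython's float sqrt gives exactly isqrt(n) for all 2 ≤ n ≤ 2^31 (the domain).
def isPrimeA (n : Int) : Bool :=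
  if n ≤ 1 then false else isPrimeLoopA n (Nat.sqrt n.toNat) 2

def pairPrime (n : Int) (arr : List Int) : Int :=
  (PySem.List.pyRange 0 n 1).foldl (fun count i =>
    (PySem.List.pyRange (i + 1) n 1).foldl (fun count j =>
      let x := isPrimeA (PySem.List.pyGetD arr i 0)
      let y := isPrimeA (PySem.List.pyGetD arr j 0)
      if x && y then count + 1 else count) count) 0

-- ===== PORT B =====
-- while d*d <= m: if m%d==0: return False; d += 1
def isPrimeLoopB (m : Int) (d : Nat) : Bool :=
  if h : (d : Int) * d ≤ m then
    if PySem.Int.mod m d = 0 then false else isPrimeLoopB m (d + 1)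
  else true
termination_by m.toNat + 1 - d
decreasing_by
  have h1 : (d : Int) ≤ (d : Int) * d := by nlinarith [Int.natCast_nonneg d]
  have h2 : (d : Int) ≤ m := le_trans h1 h
  omega

def isPrimeB (m : Int) : Bool :=
  if m < 2 then false else isPrimeLoopB m 2

def pairPrime_alt (n : Int) (arr : List Int) : Int :=
  let k := (PySem.List.pyRange 0 n 1).foldl
    (fun k i => if isPrimeB (PySem.List.pyGetD arr i 0) then k + 1 else k) 0
  PySem.Int.floordiv (k * (k - 1)) 2

-- ===== PRECONDITION & SPEC =====
-- Pre_ excludes n > len(arr) (n is meant to be the array's length): there A's arr[j] raises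
-- IndexError whenever n ≥ 2, and on the degenerate n = 1 > len(arr) = 0, where A's inner range
-- is empty so A returns 0 before indexing, B's own indexing raises IndexError itself.
def Pre_pairPrime (n : Int) (arr : List Int) : Prop := n ≤ (arr.length : Int)
instance (n : Int) (arr : List Int) : Decidable (Pre_pairPrime n arr) := by unfold Pre_pairPrime; infer_instance
def pvWitness_pairPrime : Int × List Int := (5, [2, 3, 4, 5, 9])

def Spec_pairPrime (n : Int) (arr : List Int) (out : Int) : Prop := out = pairPrime_alt n arr
instance (n : Int) (arr : List Int) (out : Int) : Decidable (Spec_pairPrime n arr out) := by unfold Spec_pairPrime; infer_instance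

-- ===== CLAIM (what is proved, stated in full; the proofs are below) =====
def Claim_equal_pairPrime : Prop := ∀ (n : Int) (arr : List Int), Dom_pairPrime n arr → Pre_pairPrime n arr → Spec_pairPrime n arr (pairPrime n arr)

-- ===== LEMMAS AND PROOFS =====

-- The two trial-division bounds agree: i ≤ √m ↔ i*i ≤ m.
lemma sq_iff (m : Int) (hm : 0 ≤ m) (i : Nat) :
    i ≤ Nat.sqrt m.toNat ↔ (i : Int) * i ≤ m := by
  rw [Nat.le_sqrt]
  rw [← Nat.cast_le (α := Int), Nat.cast_mul, Int.toNat_of_nonneg hm]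

lemma loopAB (m : Int) (hm : 0 ≤ m) :
    ∀ k i, m.toNat + 1 - i ≤ k → isPrimeLoopA m (Nat.sqrt m.toNat) i = isPrimeLoopB m i := by
  intro k
  induction k with
  | zero =>
    intro i h
    have h1 : ¬ (i ≤ Nat.sqrt m.toNat) := by
      intro hc; exact absurd (le_trans hc (Nat.sqrt_le_self _)) (by omega)
    have h2 : ¬ ((i : Int) * i ≤ m) := by rw [← sq_iff m hm]; exact h1
    rw [isPrimeLoopA, isPrimeLoopB]
    simp [h1, h2]
  | succ k ih =>
    intro i h
    by_cases hi : (i : Int) * i ≤ m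
    · have h1 : i ≤ Nat.sqrt m.toNat := (sq_iff m hm i).mpr hi
      have hle : i ≤ m.toNat := le_trans h1 (Nat.sqrt_le_self _)
      rw [isPrimeLoopA, isPrimeLoopB]
      simp only [h1, if_true, hi, dif_pos]
      split
      · rfl
      · exact ih (i + 1) (by omega)
    · have h1 : ¬ (i ≤ Nat.sqrt m.toNat) := by rw [sq_iff m hm]; exact hi
      rw [isPrimeLoopA, isPrimeLoopB]
      simp [h1, hi]

lemma isPrimeA_eq_isPrimeB (m : Int) : isPrimeA m = isPrimeB m := by
  rw [isPrimeA, isPrimeB]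
  by_cases h : m ≤ 1
  · simp [h, show m < 2 from by omega]
  · simp only [h, if_false, show ¬ (m < 2) from by omega, if_false]
    exact loopAB m (by omega) (m.toNat + 1 - 2) 2 (le_refl _)

-- 0/1 indicator and its sum over a list of candidate indices.
def ind01 (P : Int → Bool) (j : Int) : Int := if P j then 1 else 0

def Ssum (P : Int → Bool) (l : List Int) : Int := (l.map (ind01 P)).sum

lemma count_fold (P : Int → Bool) (l : List Int) (c : Int) :
    l.foldl (fun k i => if P i then k + 1 else k) c = c + Ssum P l := by
  calc l.foldl (fun k i => if P i then k + 1 else k) c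
      = l.foldl (fun k i => k + ind01 P i) c := by
        apply PySem.List.foldl_congr_mem; intro a b _; by_cases h : P b <;> simp [ind01, h]
    _ = c + Ssum P l := PySem.List.foldl_add l (ind01 P) c

lemma inner_fold (P : Int → Bool) (x : Bool) (l : List Int) (c : Int) :
    l.foldl (fun c j => if x && P j then c + 1 else c) c
      = c + (if x then Ssum P l else 0) := by
  cases x
  · simp
  · simpa using count_fold P l c

lemma S_succ (P : Int → Bool) (a b : Int) (h : a ≤ b) :
    Ssum P (PySem.List.pyRange a (b + 1)) = Ssum P (PySem.List.pyRange a b) + ind01 P b := by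
  rw [PySem.List.pyRange_one_succ_right h]
  simp [Ssum]

-- Twice A's pair count equals k*(k-1) for k the number of indices below t satisfying P.
lemma key (P : Int → Bool) (t : Nat) :
    2 * ((PySem.List.pyRange 0 (t : Int)).map
        (fun i => if P i then Ssum P (PySem.List.pyRange (i + 1) (t : Int)) else 0)).sum
      = Ssum P (PySem.List.pyRange 0 (t : Int)) * (Ssum P (PySem.List.pyRange 0 (t : Int)) - 1) := by
  induction t with
  | zero => simp [Ssum]
  | succ t ih =>
    have hc : ((t + 1 : Nat) : Int) = (t : Int) + 1 := by push_cast; ring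
    rw [hc]
    have hS : Ssum P (PySem.List.pyRange 0 ((t : Int) + 1))
        = Ssum P (PySem.List.pyRange 0 (t : Int)) + ind01 P (t : Int) :=
      S_succ P 0 (t : Int) (by positivity)
    rw [hS]
    rw [PySem.List.pyRange_one_succ_right (b := (t : Int)) (by positivity)]
    rw [List.map_append, List.sum_append]
    have hlast : ((([(t : Int)]).map
        (fun i => if P i then Ssum P (PySem.List.pyRange (i + 1) ((t : Int) + 1)) else 0)).sum) = 0 := by
      simp [Ssum, PySem.List.pyRange_one_eq_nil (by omega : (t : Int) + 1 ≤ (t : Int) + 1)]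
    rw [hlast, add_zero]
    have hmap : (PySem.List.pyRange 0 (t : Int)).map
        (fun i => if P i then Ssum P (PySem.List.pyRange (i + 1) ((t : Int) + 1)) else 0)
        = (PySem.List.pyRange 0 (t : Int)).map
        (fun i => (if P i then Ssum P (PySem.List.pyRange (i + 1) (t : Int)) else 0)
          + ind01 P (t : Int) * ind01 P i) := by
      apply List.map_congr_left
      intro i hi
      have hib := PySem.List.mem_pyRange_one.mp hi
      rw [S_succ P (i + 1) (t : Int) (by omega)]
      by_cases h : P i <;> simp [ind01, h]
    rw [hmap, PySem.List.sum_map_add_int, List.sum_map_mul_left]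
    have hsum : ((PySem.List.pyRange 0 (t : Int)).map (fun i => ind01 P i)).sum
        = Ssum P (PySem.List.pyRange 0 (t : Int)) := rfl
    rw [hsum]
    set K := Ssum P (PySem.List.pyRange 0 (t : Int)) with hKdef
    by_cases h : P (t : Int) <;> simp [ind01, h] <;> nlinarith [ih]

lemma pairPrime_eq_alt (n : Int) (arr : List Int) : pairPrime n arr = pairPrime_alt n arr := by
  have hA : pairPrime n arr = ((PySem.List.pyRange 0 n).map
      (fun i => if isPrimeB (PySem.List.pyGetD arr i 0) then
        Ssum (fun j => isPrimeB (PySem.List.pyGetD arr j 0)) (PySem.List.pyRange (i + 1) n) else 0)).sum := by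
    rw [pairPrime]
    simp only [isPrimeA_eq_isPrimeB]
    simp only [inner_fold (fun j => isPrimeB (PySem.List.pyGetD arr j 0))]
    rw [PySem.List.foldl_add]
    simp
  have hB : pairPrime_alt n arr
      = PySem.Int.floordiv (Ssum (fun j => isPrimeB (PySem.List.pyGetD arr j 0)) (PySem.List.pyRange 0 n)
          * (Ssum (fun j => isPrimeB (PySem.List.pyGetD arr j 0)) (PySem.List.pyRange 0 n) - 1)) 2 := by
    rw [pairPrime_alt]
    simp only [count_fold (fun j => isPrimeB (PySem.List.pyGetD arr j 0))]
    simp [Ssum]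
  rw [hA, hB]
  by_cases hn : n ≤ 0
  · rw [PySem.List.pyRange_one_eq_nil hn]
    simp [Ssum]
  · have hk := key (fun j => isPrimeB (PySem.List.pyGetD arr j 0)) n.toNat
    rw [Int.toNat_of_nonneg (by omega : (0:Int) ≤ n)] at hk
    rw [← hk]
    rw [PySem.Int.floordiv_eq_ediv_of_pos (by norm_num)]
    rw [Int.mul_ediv_cancel_left _ (by norm_num)]

-- ===== VERDICT (by name: the statement is the Claim_ definition above) =====
theorem pairPrime_spec : Claim_equal_pairPrime := by
  intro n arr _ _
  exact pairPrime_eq_alt n arr
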